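-- pv_equiv track=rewrite | github.com/datawhalechina/huawei-od-python | codes/others100/103_array-sort.py | solve_method
-- ===== SOURCE A (Python) =====
-- def solve_method(nums):
--     # key为数字，value为(位置, 个数)
--     num_dict = {}
--     for i, num in enumerate(nums):
--         if num not in num_dict:
--             num_dict[num] = (i, 1)
--         else:
--             count = num_dict[num][1] + 1
--             num_dict[num] = (num_dict[num][0], count)
--
--     result = sorted(num_dict.items(), key=lambda x: (-x[1][1], x[1][0]))
--     return [x[0] for x in result]
-- ===== SOURCE B (Python) =====
-- def solve_method(nums):
--     # Count occurrences; dict keeps first-occurrence order of the distinct numbers.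
--     counts = {}
--     for num in nums:
--         counts[num] = counts.get(num, 0) + 1
--     if not counts:
--         return []
--     m = max(counts.values())
--     # Pigeonhole scan: emit numbers with the highest count first; within one
--     # count the dict's first-occurrence order is exactly first-position order.
--     out = []
--     for c in range(m, 0, -1):
--         for num, k in counts.items():
--             if k == c:
--                 out.append(num)
--     return out
-- ===== Notes on version B (the rewrite author's own statement) =====
-- stated objective: alternative
-- what changed: Replaces the comparison sort on a compound (-count, first-index) key by a sort-free pigeonhole scan: count with a dict, then for each frequency from the maximum down emit the numbers with that frequency in first-occurrence order, never storing first positions at all.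
import Mathlib
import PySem

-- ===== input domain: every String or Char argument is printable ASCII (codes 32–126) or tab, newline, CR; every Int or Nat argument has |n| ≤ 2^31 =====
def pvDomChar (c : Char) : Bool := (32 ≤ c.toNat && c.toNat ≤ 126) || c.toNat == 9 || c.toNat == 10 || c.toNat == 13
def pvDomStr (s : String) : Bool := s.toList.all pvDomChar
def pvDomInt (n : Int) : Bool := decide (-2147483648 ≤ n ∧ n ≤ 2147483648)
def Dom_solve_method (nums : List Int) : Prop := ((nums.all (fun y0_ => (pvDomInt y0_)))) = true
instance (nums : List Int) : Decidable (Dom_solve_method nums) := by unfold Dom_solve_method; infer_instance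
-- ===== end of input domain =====

-- B replaces A's comparison sort on the compound (-count, first-index) key by a sort-free
-- pigeonhole scan over the counts (objective: alternative algorithm of similar cost).

-- ===== PORT A =====
def solve_method (nums : List Int) : List Int :=
  -- num_dict: key = number, value = (position, count)
  let num_dict : PySem.Dict Int (Int × Int) :=
    (PySem.List.enumerate nums).foldl (fun d p =>
      if !(d.contains p.2) then d.insert p.2 (p.1, 1)
      else
        let count := (d.getD p.2 (0, 0)).2 + 1
        d.insert p.2 ((d.getD p.2 (0, 0)).1, count)) PySem.Dict.empty
  let result := PySem.List.sorted2 num_dict.items (fun x => -x.2.2) (fun x => x.2.1)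
  result.map (fun x => x.1)

-- ===== PORT B =====
def solve_method_alt (nums : List Int) : List Int :=
  let counts : PySem.Dict Int Int :=
    nums.foldl (fun d n => d.insert n (d.getD n 0 + 1)) PySem.Dict.empty
  if counts.items.isEmpty then []
  else
    match PySem.List.max? counts.values (fun v => v) with
    | none => []  -- unreachable (counts nonempty); only makes the port total
    | some m =>
      (PySem.List.pyRange m 0 (-1)).foldl (fun out c =>
        counts.items.foldl (fun out p => if p.2 == c then out ++ [p.1] else out) out) []

-- ===== PRECONDITION & SPEC =====
def Spec_solve_method (nums : List Int) (out : List Int) : Prop := out = solve_method_alt nums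
instance (nums : List Int) (out : List Int) : Decidable (Spec_solve_method nums out) := by unfold Spec_solve_method; infer_instance

-- ===== CLAIM (what is proved, stated in full; the proofs are below) =====
def Claim_equal_solve_method : Prop := ∀ (nums : List Int), Dom_solve_method nums → Spec_solve_method nums (solve_method nums)

-- ===== LEMMAS AND PROOFS =====

def pvDictA (nums : List Int) : PySem.Dict Int (Int × Int) :=
  (PySem.List.enumerate nums).foldl (fun d p =>
    if !(d.contains p.2) then d.insert p.2 (p.1, 1)
    else
      let count := (d.getD p.2 (0, 0)).2 + 1
      d.insert p.2 ((d.getD p.2 (0, 0)).1, count)) PySem.Dict.empty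

def pvItem (nums : List Int) (k : Int) : Int × Int × Int :=
  (k, ((List.idxOf k nums : Int), (List.count k nums : Int)))

theorem pv_ofList_append_singleton (xs : List Int) (x : Int) :
    PySem.Set.ofList (xs ++ [x])
      = if x ∈ xs then PySem.Set.ofList xs else PySem.Set.ofList xs ++ [x] := by
  have h : PySem.Set.ofList (xs ++ [x]) = PySem.Set.add (PySem.Set.ofList xs) x := by
    simp [PySem.Set.ofList, List.foldl_append]
  rw [h]
  unfold PySem.Set.add
  by_cases hx : x ∈ xs
  · rw [if_pos hx, if_pos]
    rw [PySem.Set.contains, List.contains_iff_mem, PySem.Set.mem_ofList]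
    exact hx
  · rw [if_neg hx, if_neg]
    rw [PySem.Set.contains, List.contains_iff_mem, PySem.Set.mem_ofList]
    exact hx

theorem pvDictA_append_singleton (xs : List Int) (x : Int) :
    pvDictA (xs ++ [x]) =
      (fun d (p : Int × Int) =>
        if !(d.contains p.2) then d.insert p.2 (p.1, 1)
        else
          let count := (d.getD p.2 (0, 0)).2 + 1
          d.insert p.2 ((d.getD p.2 (0, 0)).1, count)) (pvDictA xs) ((xs.length : Int), x) := by
  unfold pvDictA
  rw [PySem.List.enumerate_append, List.foldl_append]
  simp [PySem.List.enumerate_cons, PySem.List.enumerate_nil]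

theorem pvDictA_items (nums : List Int) :
    (pvDictA nums).items = (PySem.Set.ofList nums).map (pvItem nums) := by
  induction nums using List.reverseRecOn with
  | nil => rfl
  | append_singleton xs x ih =>
    rw [pvDictA_append_singleton, pv_ofList_append_singleton]
    have hkeys : (pvDictA xs).keys = PySem.Set.ofList xs := by
      unfold PySem.Dict.keys
      rw [ih, List.map_map]
      simp [Function.comp_def, pvItem]
    have hnodup : (pvDictA xs).keys.Nodup := hkeys ▸ PySem.Set.nodup_ofList xs
    by_cases hx : x ∈ xs
    · -- contains = true
      have hmemS : x ∈ PySem.Set.ofList xs := (PySem.Set.mem_ofList xs x).mpr hx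
      have hcont : (pvDictA xs).contains x = true := by
        unfold PySem.Dict.contains
        rw [List.any_eq_true]
        exact ⟨pvItem xs x, ih ▸ List.mem_map_of_mem hmemS, by simp [pvItem]⟩
      have hgetD : (pvDictA xs).getD x (0, 0)
          = ((List.idxOf x xs : Int), (List.count x xs : Int)) := by
        apply PySem.Dict.getD_of_mem_items (d := pvDictA xs)
          (v := ((List.idxOf x xs : Int), (List.count x xs : Int)))
        · rw [ih]; exact List.mem_map_of_mem hmemS
        · exact hnodup
      simp only [hcont, Bool.not_true, if_neg (by decide : ¬ (false = true)), hgetD,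
        if_pos hx]
      rw [PySem.Dict.items_insert_of_contains _ _ hcont, ih, List.map_map]
      apply List.map_congr_left
      intro k hk
      have hkxs : k ∈ xs := (PySem.Set.mem_ofList xs k).mp hk
      by_cases hkx : k = x
      · subst hkx
        have hidx : List.idxOf k (xs ++ [k]) = List.idxOf k xs := by
          rw [List.idxOf_append, if_pos hkxs]
        have hcnt : List.count k (xs ++ [k]) = List.count k xs + 1 := by
          simp [List.count_append]
        simp [pvItem, hidx, hcnt]
      · simp only [Function.comp_apply, pvItem]
        rw [if_neg (by simpa using hkx)]
        have hidx : List.idxOf k (xs ++ [x]) = List.idxOf k xs := by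
          rw [List.idxOf_append, if_pos hkxs]
        have hcnt : List.count k (xs ++ [x]) = List.count k xs := by
          simp [List.count_append, Ne.symm hkx]
        rw [hidx, hcnt]
    · -- contains = false
      have hcont : (pvDictA xs).contains x = false := by
        unfold PySem.Dict.contains
        rw [List.any_eq_false]
        intro p hp
        rw [ih, List.mem_map] at hp
        obtain ⟨k, hk, rfl⟩ := hp
        have : k ∈ xs := (PySem.Set.mem_ofList xs k).mp hk
        simp [pvItem]
        rintro rfl; exact hx this
      simp only [hcont, Bool.not_false, if_neg hx]
      rw [if_pos trivial]
      rw [PySem.Dict.items_insert_of_not_contains _ _ hcont, ih, List.map_append]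
      congr 1
      · apply List.map_congr_left
        intro k hk
        have hkxs : k ∈ xs := (PySem.Set.mem_ofList xs k).mp hk
        have hkx : k ≠ x := fun h => hx (h ▸ hkxs)
        simp only [pvItem]
        have hidx : List.idxOf k (xs ++ [x]) = List.idxOf k xs := by
          rw [List.idxOf_append, if_pos hkxs]
        have hcnt : List.count k (xs ++ [x]) = List.count k xs := by
          simp [List.count_append, Ne.symm hkx]
        rw [hidx, hcnt]
      · simp only [List.map_cons, List.map_nil, pvItem]
        have hidx : List.idxOf x (xs ++ [x]) = xs.length := by
          rw [List.idxOf_append, if_neg hx]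
          simp
        have hcnt : List.count x (xs ++ [x]) = 1 := by
          simp [List.count_append, List.count_eq_zero_of_not_mem hx]
        rw [hidx, hcnt]
        norm_num

theorem pv_ofList_pairwise_idxOf (nums : List Int) :
    (PySem.Set.ofList nums).Pairwise (fun a b => List.idxOf a nums < List.idxOf b nums) := by
  induction nums using List.reverseRecOn with
  | nil => simp [PySem.Set.ofList, PySem.Set.empty]
  | append_singleton xs x ih =>
    rw [pv_ofList_append_singleton]
    have hsame : ∀ a ∈ PySem.Set.ofList xs, List.idxOf a (xs ++ [x]) = List.idxOf a xs := by
      intro a ha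
      rw [List.idxOf_append, if_pos ((PySem.Set.mem_ofList xs a).mp ha)]
    by_cases hx : x ∈ xs
    · rw [if_pos hx]
      exact ih.imp_of_mem (fun {a b} ha hb h => by rw [hsame a ha, hsame b hb]; exact h)
    · rw [if_neg hx]
      rw [List.pairwise_append]
      refine ⟨ih.imp_of_mem (fun {a b} ha hb h => by rw [hsame a ha, hsame b hb]; exact h),
        List.pairwise_singleton _ _, ?_⟩
      intro a ha b hb
      rw [List.mem_singleton] at hb
      subst hb
      rw [hsame a ha, List.idxOf_append, if_neg hx]
      have h1 : List.idxOf a xs < xs.length :=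
        List.idxOf_lt_length_of_mem ((PySem.Set.mem_ofList xs a).mp ha)
      have h2 : List.idxOf b [b] = 0 := by simp
      omega

theorem pv_sorted2_eq_sorted_lex {α : Type} (xs : List α) (k1 k2 : α → Int) :
    PySem.List.sorted2 xs k1 k2 = PySem.List.sorted xs (fun a => toLex (k1 a, k2 a)) := by
  unfold PySem.List.sorted2 PySem.List.sorted
  simp only [if_neg (by decide : ¬ (false = true))]
  have hb : (fun (a b : α) => decide (k1 a < k1 b) || (!decide (k1 b < k1 a) && decide (k2 a < k2 b)))
      = fun a b => decide ((toLex (k1 a, k2 a) : Lex (Int × Int)) < toLex (k1 b, k2 b)) := by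
    funext a b
    rw [Bool.eq_iff_iff]
    simp only [Bool.or_eq_true, Bool.and_eq_true, Bool.not_eq_true', decide_eq_true_eq,
      decide_eq_false_iff_not, Prod.Lex.toLex_lt_toLex]
    constructor
    · rintro (h | ⟨h1, h2⟩)
      · exact Or.inl h
      · rcases lt_or_eq_of_le (not_lt.mp h1) with h | h
        · exact Or.inl h
        · exact Or.inr ⟨h, h2⟩
    · rintro (h | ⟨h1, h2⟩)
      · exact Or.inl h
      · exact Or.inr ⟨by omega, h2⟩
  rw [hb]

theorem pv_perm_blocks {α : Type} (cs : List Int) (key : α → Int) :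
    ∀ L : List α, cs.Nodup → (∀ p ∈ L, key p ∈ cs) →
      (cs.flatMap (fun c => L.filter (fun p => key p == c))).Perm L := by
  induction cs with
  | nil =>
    intro L _ hall
    have : L = [] := List.eq_nil_iff_forall_not_mem.mpr (fun x hx => by simpa using hall x hx)
    simp [this]
  | cons c cs ih =>
    intro L hnd hall
    rw [List.flatMap_cons]
    have hrest : ∀ c' ∈ cs, L.filter (fun p => key p == c')
        = (L.filter (fun p => !(key p == c))).filter (fun p => key p == c') := by
      intro c' hc'
      rw [List.filter_filter]
      apply List.filter_congr
      intro p _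
      have hne : c' ≠ c := by rintro rfl; exact (List.nodup_cons.mp hnd).1 hc'
      by_cases h : key p = c' <;> simp [h, hne]
    have hflat : cs.flatMap (fun c' => L.filter (fun p => key p == c'))
        = cs.flatMap (fun c' => (L.filter (fun p => !(key p == c))).filter (fun p => key p == c')) := by
      simp only [List.flatMap]
      congr 1
      exact List.map_congr_left hrest
    rw [hflat]
    have hside : ∀ p ∈ L.filter (fun p => !(key p == c)), key p ∈ cs := by
      intro p hp
      have hmem := List.mem_filter.mp hp
      rcases List.mem_cons.mp (hall p hmem.1) with h | h
      · exfalso; simp [h] at hmem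
      · exact h
    have ihM := ih (L.filter (fun p => !(key p == c))) (List.nodup_cons.mp hnd).2 hside
    exact (List.Perm.append_left _ ihM).trans (List.filter_append_perm _ L)

theorem pv_pairwise_blocks (cs : List Int) (L : List (Int × Int × Int))
    (hcs : cs.Pairwise (fun a b => b < a))
    (hL : L.Pairwise (fun a b => a.2.1 < b.2.1)) :
    (cs.flatMap (fun c => L.filter (fun p => p.2.2 == c))).Pairwise
      (fun a b => (toLex (-a.2.2, a.2.1) : Lex (Int × Int)) < toLex (-b.2.2, b.2.1)) := by
  induction cs with
  | nil => simp
  | cons c cs ih =>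
    rw [List.flatMap_cons]
    have hmem : ∀ q ∈ cs.flatMap (fun c' => L.filter (fun p => p.2.2 == c')),
        ∃ c' ∈ cs, q.2.2 = c' := by
      intro q hq
      rw [List.mem_flatMap] at hq
      obtain ⟨c', hc', hq⟩ := hq
      exact ⟨c', hc', by simpa using (List.mem_filter.mp hq).2⟩
    rw [List.pairwise_append]
    refine ⟨?_, ih (List.Pairwise.sublist (List.sublist_cons_self c cs) hcs), ?_⟩
    · have h1 : (L.filter (fun p => p.2.2 == c)).Pairwise (fun a b => a.2.1 < b.2.1) :=
        List.Pairwise.sublist List.filter_sublist hL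
      refine h1.imp_of_mem ?_
      intro a b ha hb hab
      have hac : a.2.2 = c := by simpa using (List.mem_filter.mp ha).2
      have hbc : b.2.2 = c := by simpa using (List.mem_filter.mp hb).2
      rw [Prod.Lex.toLex_lt_toLex]
      exact Or.inr ⟨by rw [hac, hbc], hab⟩
    · intro a ha b hb
      have hac : a.2.2 = c := by simpa using (List.mem_filter.mp ha).2
      obtain ⟨c', hc', hbc⟩ := hmem b hb
      have hlt : c' < c := (List.pairwise_cons.mp hcs).1 c' hc'
      rw [Prod.Lex.toLex_lt_toLex]
      exact Or.inl (by omega)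

theorem solve_method_eq_alt (nums : List Int) : solve_method nums = solve_method_alt nums := by
  rcases eq_or_ne nums [] with rfl | hne
  · rfl
  · have hA : solve_method nums
        = (PySem.List.sorted2 (pvDictA nums).items (fun x => -x.2.2) (fun x => x.2.1)).map
            (fun x => x.1) := rfl
    have hitemsC : (PySem.Dict.counter nums).items
        = (PySem.Set.ofList nums).map (fun k => (k, (List.count k nums : Int))) :=
      PySem.Dict.items_counter nums
    have hSne : PySem.Set.ofList nums ≠ [] := by
      obtain ⟨y, hy⟩ := List.exists_mem_of_ne_nil nums hne
      exact List.ne_nil_of_mem ((PySem.Set.mem_ofList nums y).mpr hy)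
    have hCne : (PySem.Dict.counter nums).items ≠ [] := by
      rw [hitemsC]
      simpa using hSne
    have hVne : (PySem.Dict.counter nums).values ≠ [] := by
      unfold PySem.Dict.values
      simpa using hCne
    obtain ⟨m, hmax⟩ : ∃ m, PySem.List.max? (PySem.Dict.counter nums).values (fun v => v) = some m := by
      cases hmx : PySem.List.max? (PySem.Dict.counter nums).values (fun v => v) with
      | none => exact absurd ((PySem.List.max?_eq_none_iff _ _).mp hmx) hVne
      | some m => exact ⟨m, rfl⟩
    have hB : solve_method_alt nums
        = (PySem.List.pyRange m 0 (-1)).foldl (fun out c =>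
            (PySem.Dict.counter nums).items.foldl
              (fun out p => if p.2 == c then out ++ [p.1] else out) out) [] := by
      simp only [solve_method_alt, PySem.Dict.foldl_insert_getD_add_one_eq_counter, hmax,
        List.isEmpty_iff, if_neg hCne]
    rw [hB]
    simp only [PySem.List.foldl_append_if]
    rw [PySem.List.foldl_append_eq_flatMap, List.nil_append]
    have hLproj : (PySem.Dict.counter nums).items
        = (pvDictA nums).items.map (fun p => (p.1, p.2.2)) := by
      rw [hitemsC, pvDictA_items, List.map_map]
      apply List.map_congr_left
      intro k _
      simp [pvItem]
    have hBblocks : ∀ c : Int,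
        ((PySem.Dict.counter nums).items.filter (fun p => p.2 == c)).map (fun p => p.1)
        = ((pvDictA nums).items.filter (fun p => p.2.2 == c)).map (fun p => p.1) := by
      intro c
      rw [hLproj, List.filter_map, List.map_map]
      rfl
    have hnodupcs : (PySem.List.pyRange m 0 (-1)).Nodup := by
      rw [PySem.List.pyRange_neg_one_eq_reverse]
      exact List.nodup_reverse.mpr (PySem.List.nodup_pyRange_one _ _)
    have hcs : (PySem.List.pyRange m 0 (-1)).Pairwise (fun a b => b < a) := by
      rw [PySem.List.pyRange_neg_one_eq_reverse, List.pairwise_reverse]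
      exact PySem.List.pairwise_lt_pyRange_one _ _
    have hall : ∀ p ∈ (pvDictA nums).items, p.2.2 ∈ PySem.List.pyRange m 0 (-1) := by
      intro p hp
      rw [pvDictA_items] at hp
      obtain ⟨k, hk, rfl⟩ := List.mem_map.mp hp
      rw [PySem.List.mem_pyRange_neg_one]
      constructor
      · have h0 : 0 < List.count k nums :=
          List.count_pos_iff.mpr ((PySem.Set.mem_ofList nums k).mp hk)
        simp only [pvItem]
        exact_mod_cast h0
      · have hv : ((List.count k nums : Int)) ∈ (PySem.Dict.counter nums).values := by
          unfold PySem.Dict.values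
          rw [hitemsC, List.map_map]
          exact List.mem_map.mpr ⟨k, hk, rfl⟩
        have := PySem.List.max?_isMax hmax _ hv
        simpa [pvItem] using this
    have hLpw : (pvDictA nums).items.Pairwise (fun a b => a.2.1 < b.2.1) := by
      rw [pvDictA_items, List.pairwise_map]
      refine (pv_ofList_pairwise_idxOf nums).imp ?_
      intro a b h
      simp only [pvItem]
      exact_mod_cast h
    have hsorted := PySem.List.sorted_eq_of_perm_of_pairwise_lt
        (pvDictA nums).items
        ((PySem.List.pyRange m 0 (-1)).flatMap
          (fun c => (pvDictA nums).items.filter (fun p => p.2.2 == c)))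
        (fun x => (toLex (-x.2.2, x.2.1) : Lex (Int × Int)))
        (pv_perm_blocks _ (fun p : Int × Int × Int => p.2.2) _ hnodupcs hall)
        (pv_pairwise_blocks _ _ hcs hLpw)
    rw [hA, pv_sorted2_eq_sorted_lex, hsorted, List.map_flatMap]
    apply Eq.symm
    simp only [List.flatMap]
    congr 1
    apply List.map_congr_left
    intro c _
    exact hBblocks c

-- ===== VERDICT (by name: the statement is the Claim_ definition above) =====
theorem solve_method_spec : Claim_equal_solve_method := by
  intro nums _
  unfold Spec_solve_method
  exact solve_method_eq_alt nums
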